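-- pv_equiv track=rewrite | github.com/nikolas-virionis/spotify-api | spotify_recommender_api/util.py | item_list_indexed
-- ===== SOURCE A (Python) =====
-- def item_list_indexed(items: 'list[str]', all_items: 'list[str]') -> 'list[int]':
--     """Function that returns the list of items, mapped to the overall list of items, in a binary format
--     Useful for the overall execution of the algorithm which determines the distance between each song
--
--     Args:
--         items (list[str]): list of items for a given song
--         all_items (list[str]): all the items inside the entire playlist
--
--     Returns:
--         list[int]: indexed list of items in binary format in comparison to all the items inside the playlist
--     """
--     indexed = []
--     for all_genres_x in all_items:
--
--         continue_outer = False
--         for item in items: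
--             index = all_genres_x == item
--             if index:
--                 continue_outer = True
--                 indexed.append(int(True))
--                 break
--
--         if continue_outer:
--             continue
--
--         indexed.append(int(False))
--
--     return indexed
-- ===== SOURCE B (Python) =====
-- def item_list_indexed(items: 'list[str]', all_items: 'list[str]') -> 'list[int]':
--     result = [0] * len(all_items)
--     positions = {}
--     for i, x in enumerate(all_items):
--         positions.setdefault(x, []).append(i)
--     for item in items:
--         for i in positions.get(item, []):
--             result[i] = 1
--     return result
-- ===== Notes on version B (the rewrite author's own statement) =====
-- stated objective: faster
-- what changed: Replaces A's nested membership scan with an inverted index: B enumerates all_items once into a dict mapping each value to its list of positions, then writes 1s into a zero-initialized result at the positions of each item.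
import Mathlib
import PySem

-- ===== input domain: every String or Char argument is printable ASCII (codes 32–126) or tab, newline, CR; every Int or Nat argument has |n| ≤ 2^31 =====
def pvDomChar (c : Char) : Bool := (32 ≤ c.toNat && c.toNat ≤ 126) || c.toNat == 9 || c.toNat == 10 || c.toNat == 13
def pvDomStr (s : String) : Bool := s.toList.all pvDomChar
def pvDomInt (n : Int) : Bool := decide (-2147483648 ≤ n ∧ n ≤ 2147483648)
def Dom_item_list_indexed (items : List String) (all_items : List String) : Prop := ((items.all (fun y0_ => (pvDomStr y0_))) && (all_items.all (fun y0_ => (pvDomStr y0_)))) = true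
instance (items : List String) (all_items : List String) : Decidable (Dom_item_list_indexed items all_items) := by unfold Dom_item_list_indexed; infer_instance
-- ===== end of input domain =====

-- B builds an inverted index (value -> list of positions) of all_items once and writes 1s into a
-- zero-initialized result at those positions for each item, instead of A's nested membership scan.


-- ===== PORT A =====
-- inner 'for item in items: if all_genres_x == item: break' loop of A
def pvInnerA (x : String) : List String → Bool
  | [] => false
  | i :: rest => if x == i then true else pvInnerA x rest

def item_list_indexed (items : List String) (all_items : List String) : List Int :=
  all_items.foldl (fun indexed all_genres_x =>
    if pvInnerA all_genres_x items then indexed ++ [(1 : Int)] else indexed ++ [(0 : Int)]) []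

-- ===== PORT B =====
-- 'positions = {}; for i, x in enumerate(all_items): positions.setdefault(x, []).append(i)'
def pvPositions (all_items : List String) : PySem.Dict String (List Int) :=
  (PySem.List.enumerate all_items).foldl
    (fun d p => d.modify p.2 [] (fun l => l ++ [p.1])) PySem.Dict.empty

def item_list_indexed_alt (items : List String) (all_items : List String) : List Int :=
  let positions := pvPositions all_items
  items.foldl
    (fun result item =>
      (positions.getD item []).foldl (fun r i => PySem.List.pySetD r i 1) result)
    (List.replicate all_items.length (0 : Int))

-- ===== PRECONDITION & SPEC =====
def Spec_item_list_indexed (items : List String) (all_items : List String) (out : List Int) : Prop := out = item_list_indexed_alt items all_items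
instance (items : List String) (all_items : List String) (out : List Int) : Decidable (Spec_item_list_indexed items all_items out) := by unfold Spec_item_list_indexed; infer_instance

-- ===== CLAIM (what is proved, stated in full; the proofs are below) =====
def Claim_equal_item_list_indexed : Prop := ∀ (items : List String) (all_items : List String), Dom_item_list_indexed items all_items → Spec_item_list_indexed items all_items (item_list_indexed items all_items)

-- ===== LEMMAS AND PROOFS =====

lemma pvInnerA_eq (x : String) (items : List String) :
    pvInnerA x items = decide (x ∈ items) := by
  induction items with
  | nil => simp [pvInnerA]
  | cons i rest ih =>
    by_cases h : x = i
    · simp [pvInnerA, h]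
    · simp [pvInnerA, h, ih]

lemma item_list_indexed_eq_map (items all_items : List String) :
    item_list_indexed items all_items
      = all_items.map (fun x => if x ∈ items then (1 : Int) else 0) := by
  unfold item_list_indexed
  have hfun : (fun (indexed : List Int) (x : String) =>
      if pvInnerA x items then indexed ++ [(1 : Int)] else indexed ++ [(0 : Int)])
      = fun indexed x => indexed ++ [if x ∈ items then (1 : Int) else 0] := by
    funext indexed x
    rw [pvInnerA_eq]
    by_cases h : x ∈ items <;> simp [h]
  rw [hfun, PySem.List.foldl_append_singleton_eq_map]
  simp

-- the inverted index lists exactly the positions of each value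
lemma mem_pvPositions_getD (all_items : List String) (it : String) (i : Int) :
    i ∈ (pvPositions all_items).getD it []
      ↔ ∃ (k : Nat) (_ : k < all_items.length), i = (k : Int) ∧ all_items[k] = it := by
  unfold pvPositions
  have hswap : (PySem.List.enumerate all_items).foldl
      (fun d p => d.modify p.2 [] (fun l => l ++ [p.1])) PySem.Dict.empty
      = ((PySem.List.enumerate all_items).map (fun p => (p.2, p.1))).foldl
          (fun d p => d.modify p.1 [] (fun l => l ++ [p.2])) PySem.Dict.empty := by
    rw [List.foldl_map]
  rw [hswap, PySem.Dict.getD_foldl_modify_append]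
  simp only [PySem.Dict.getD_empty, List.nil_append, List.mem_map, List.mem_filter,
    List.mem_map]
  constructor
  · rintro ⟨p, ⟨⟨q, hq, rfl⟩, hfil⟩, rfl⟩
    rcases (PySem.List.mem_enumerate_iff all_items 0 q).1 hq with ⟨k, hk, rfl⟩
    refine ⟨k, hk, by simp, by simpa using hfil⟩
  · rintro ⟨k, hk, rfl, hit⟩
    refine ⟨((k : Int), all_items[k]).swap, ⟨⟨((k : Int), all_items[k]), ?_, rfl⟩, ?_⟩, rfl⟩
    · exact (PySem.List.mem_enumerate_iff all_items 0 _).2 ⟨k, hk, by simp⟩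
    · simpa using hit

lemma pvPositions_nonneg (all_items : List String) (it : String) (i : Int)
    (h : i ∈ (pvPositions all_items).getD it []) : 0 ≤ i := by
  rcases (mem_pvPositions_getD all_items it i).1 h with ⟨k, _, rfl, _⟩
  exact Int.natCast_nonneg k

-- writing 1 at a list of nonnegative indices, read back at j
lemma setfold_getElem? (L : List Int) (hL : ∀ i ∈ L, 0 ≤ i) (r : List Int) (j : Nat) :
    (L.foldl (fun r i => PySem.List.pySetD r i 1) r)[j]?
      = if (j : Int) ∈ L ∧ j < r.length then some 1 else r[j]? := by
  induction L generalizing r with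
  | nil => simp
  | cons i L' ih =>
    have hi : 0 ≤ i := hL i (by simp)
    have hL' : ∀ i ∈ L', 0 ≤ i := fun x hx => hL x (by simp [hx])
    simp only [List.foldl_cons]
    rw [ih hL', PySem.List.pySetD_of_nonneg _ _ hi]
    simp only [List.length_set, List.mem_cons]
    by_cases hj : j < r.length
    · by_cases hmem : (j : Int) ∈ L'
      · simp [hmem, hj]
      · by_cases hij : (j : Int) = i
        · have ht : i.toNat = j := by omega
          simp [hij, hj, ht]
        · have hne : ¬ i.toNat = j := by omega
          simp [hmem, hij, hj, hne]
    · by_cases ht : i.toNat = j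
      · simp [hj, ht]
      · simp [hj]

lemma setfold_length (L : List Int) (r : List Int) :
    (L.foldl (fun r i => PySem.List.pySetD r i 1) r).length = r.length := by
  induction L generalizing r with
  | nil => rfl
  | cons i L' ih => simp [List.foldl_cons, ih, PySem.List.length_pySetD]

lemma outerfold_getElem? (pos : String → List Int) (hpos : ∀ it, ∀ i ∈ pos it, 0 ≤ i)
    (its : List String) (r : List Int) (j : Nat) :
    (its.foldl (fun r item => (pos item).foldl (fun r i => PySem.List.pySetD r i 1) r) r)[j]?
      = if (∃ it ∈ its, (j : Int) ∈ pos it) ∧ j < r.length then some 1 else r[j]? := by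
  induction its generalizing r with
  | nil => simp
  | cons it its' ih =>
    simp only [List.foldl_cons]
    rw [ih, setfold_length, setfold_getElem? _ (hpos it)]
    by_cases hj : j < r.length
    · by_cases h1 : (j : Int) ∈ pos it
      · simp [hj, h1]
      · by_cases h2 : ∃ x ∈ its', (j : Int) ∈ pos x <;> simp [hj, h1, h2]
    · simp [hj]

lemma item_list_indexed_alt_eq_map (items all_items : List String) :
    item_list_indexed_alt items all_items
      = all_items.map (fun x => if x ∈ items then (1 : Int) else 0) := by
  unfold item_list_indexed_alt
  apply List.ext_getElem?
  intro j
  rw [outerfold_getElem? _ (fun it i hi => pvPositions_nonneg all_items it i hi)]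
  simp only [List.length_replicate]
  by_cases hj : j < all_items.length
  · have hex : (∃ it ∈ items, (j : Int) ∈ (pvPositions all_items).getD it [])
        ↔ all_items[j] ∈ items := by
      constructor
      · rintro ⟨it, hit, hmem⟩
        rcases (mem_pvPositions_getD all_items it _).1 hmem with ⟨k, hk, hkj, hval⟩
        have : k = j := by omega
        subst this
        rw [hval]; exact hit
      · intro h
        exact ⟨all_items[j], h,
          (mem_pvPositions_getD all_items _ _).2 ⟨j, hj, rfl, rfl⟩⟩
    by_cases hmem : all_items[j] ∈ items
    · simp [hj, hex, hmem]
    · simp [hj, hex, hmem]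
  · simp [hj]

-- ===== VERDICT =====
theorem item_list_indexed_spec : Claim_equal_item_list_indexed := by
  intro items all_items _
  unfold Spec_item_list_indexed
  rw [item_list_indexed_eq_map, item_list_indexed_alt_eq_map]
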